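-- pv_equiv track=rewrite | github.com/AnPeterd/python-exercises-2025 | mastermind_funcs.py | wrong_position
-- ===== SOURCE A (Python) =====
-- def wrong_position(guess, code):
--     counter = 0
--     code_copy = code.copy()
--
--     for i in range(min(len(guess), len(code))):
--         if guess[i] == code[i]:
--             code_copy[i] = None
--
--     for i in range(min(len(guess), len(code))):
--         if guess[i] != code[i] and guess[i] in code_copy:
--             counter += 1
--             code_copy[code_copy.index(guess[i])] = None
--     return counter
-- ===== SOURCE B (Python) =====
-- def wrong_position(guess, code):
--     m = min(len(guess), len(code))
--     gcount = {}
--     for i in range(m):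
--         if guess[i] != code[i]:
--             g = guess[i]
--             gcount[g] = gcount.get(g, 0) + 1
--     ccount = {}
--     for i in range(len(code)):
--         if not (i < m and guess[i] == code[i]):
--             c = code[i]
--             ccount[c] = ccount.get(c, 0) + 1
--     total = 0
--     for c in gcount:
--         total += min(gcount[c], ccount.get(c, 0))
--     return total
-- ===== Notes on version B (the rewrite author's own statement) =====
-- stated objective: faster
-- what changed: Replaces A's quadratic greedy scan-and-erase over a copy of code ('in' + '.index' inner scans) with one-pass hash-map color counting: tally non-exact guess pegs and available code pegs per color, then sum min of the two counts per color.
import Mathlib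
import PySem

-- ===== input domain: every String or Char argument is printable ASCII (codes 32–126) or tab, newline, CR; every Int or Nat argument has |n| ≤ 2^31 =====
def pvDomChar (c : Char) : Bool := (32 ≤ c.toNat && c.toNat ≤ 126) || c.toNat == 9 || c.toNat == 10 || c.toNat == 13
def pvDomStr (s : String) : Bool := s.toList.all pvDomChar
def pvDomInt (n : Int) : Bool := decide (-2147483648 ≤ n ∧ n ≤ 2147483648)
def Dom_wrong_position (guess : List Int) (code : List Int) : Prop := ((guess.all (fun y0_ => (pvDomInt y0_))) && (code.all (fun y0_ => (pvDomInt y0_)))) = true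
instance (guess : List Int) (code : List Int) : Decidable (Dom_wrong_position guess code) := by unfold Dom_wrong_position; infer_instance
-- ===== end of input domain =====

-- B replaces A's quadratic greedy scan-and-erase with one-pass per-color counting (sum of min counts); equal on all inputs.

-- ===== PORT A =====
-- literal transliteration of A: copy code (entries may become None → List (Option Int)),
-- null out exact matches, then greedily consume a color match per non-exact guess peg
-- ('in' membership test + '.index' first occurrence, set to None).
def wrong_position (guess : List Int) (code : List Int) : Int :=
  let m := min guess.length code.length
  let code_copy : List (Option Int) := code.map some
  let code_copy := (List.range m).foldl (fun cc i =>
      if guess.getD i 0 = code.getD i 0 then cc.set i none else cc) code_copy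
  let st := (List.range m).foldl (fun (st : Int × List (Option Int)) i =>
      if guess.getD i 0 ≠ code.getD i 0 ∧ some (guess.getD i 0) ∈ st.2 then
        (st.1 + 1, st.2.set ((PySem.List.index? st.2 (some (guess.getD i 0))).getD 0) none)
      else st) (0, code_copy)
  st.1

-- ===== PORT B =====
-- literal transliteration of B (Source B): count non-exact guess pegs per color (gc),
-- count available code pegs per color (cc), sum min(gc[c], cc.get(c, 0)) over gc's keys.
def wrong_position_alt (guess : List Int) (code : List Int) : Int :=
  let m := min guess.length code.length
  let gc := (List.range m).foldl (fun (d : PySem.Dict Int Int) i =>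
      if guess.getD i 0 ≠ code.getD i 0 then
        d.insert (guess.getD i 0) (d.getD (guess.getD i 0) 0 + 1)
      else d) PySem.Dict.empty
  let cc := (List.range code.length).foldl (fun (d : PySem.Dict Int Int) i =>
      if i < m ∧ guess.getD i 0 = code.getD i 0 then d
      else d.insert (code.getD i 0) (d.getD (code.getD i 0) 0 + 1)) PySem.Dict.empty
  gc.keys.foldl (fun total c => total + min (gc.getD c 0) (cc.getD c 0)) 0

-- ===== PRECONDITION & SPEC =====
def Spec_wrong_position (guess : List Int) (code : List Int) (out : Int) : Prop := out = wrong_position_alt guess code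
instance (guess : List Int) (code : List Int) (out : Int) : Decidable (Spec_wrong_position guess code out) := by unfold Spec_wrong_position; infer_instance

-- ===== CLAIM (what is proved, stated in full; the proofs are below) =====
def Claim_equal_wrong_position : Prop := ∀ (guess : List Int) (code : List Int), Dom_wrong_position guess code → Spec_wrong_position guess code (wrong_position guess code)

-- ===== LEMMAS AND PROOFS =====

-- the non-exact guess pegs (positions < min length with guess ≠ code), in order
def pvGRem (guess code : List Int) : List Int :=
  ((List.range (min guess.length code.length)).filter
      (fun i => decide (guess.getD i 0 ≠ code.getD i 0))).map (fun i => guess.getD i 0)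

-- the code pegs not consumed by an exact match, in order
def pvCRem (guess code : List Int) : List Int :=
  ((List.range code.length).filter
      (fun j => decide (¬ (j < min guess.length code.length ∧ guess.getD j 0 = code.getD j 0)))).map
    (fun j => code.getD j 0)

-- abstract greedy matcher: A's second loop on the list of remaining colors
def pvGreedy : List Int → List Int → Nat
  | [], _ => 0
  | g :: gs, cs => if g ∈ cs then pvGreedy gs (cs.erase g) + 1 else pvGreedy gs cs

theorem pvMemFilterMap (cc : List (Option Int)) (g : Int) :
    some g ∈ cc ↔ g ∈ cc.filterMap id := by
  simp [List.mem_filterMap]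

theorem pvErase (cc : List (Option Int)) (g : Int) (h : some g ∈ cc) :
    (cc.set ((PySem.List.index? cc (some g)).getD 0) none).filterMap id
      = (cc.filterMap id).erase g := by
  induction cc with
  | nil => cases h
  | cons o t ih =>
    by_cases ho : o = some g
    · subst ho
      rw [PySem.List.index?_cons_self]
      simp
    · have ht : some g ∈ t := by
        rcases List.mem_cons.mp h with h' | h'
        · exact absurd h'.symm ho
        · exact h'
      rw [PySem.List.index?_cons_of_ne t ho]
      obtain ⟨k, hk⟩ := Option.isSome_iff_exists.mp ((PySem.List.index?_isSome_iff t _).mpr ht)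
      have ih' := ih ht
      rw [hk] at ih' ⊢
      simp only [Option.map_some, Option.getD_some] at ih' ⊢
      cases o with
      | none => simpa [List.filterMap_cons] using ih'
      | some c =>
        have hc : ¬ (c = g) := fun e => ho (by rw [e])
        simpa [List.erase_cons, hc] using ih' 

theorem pvLoop2 (guess code : List Int) :
    ∀ (L : List Nat) (cc : List (Option Int)) (n : Int),
      (L.foldl (fun (st : Int × List (Option Int)) i =>
          if guess.getD i 0 ≠ code.getD i 0 ∧ some (guess.getD i 0) ∈ st.2 then
            (st.1 + 1, st.2.set ((PySem.List.index? st.2 (some (guess.getD i 0))).getD 0) none)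
          else st) (n, cc)).1
        = n + (pvGreedy ((L.filter (fun i => decide (guess.getD i 0 ≠ code.getD i 0))).map
              (fun i => guess.getD i 0)) (cc.filterMap id) : Int) := by
  intro L
  induction L with
  | nil => intro cc n; simp [pvGreedy]
  | cons i L ih =>
    intro cc n
    by_cases hne : guess.getD i 0 ≠ code.getD i 0
    · have hd : decide (guess.getD i 0 ≠ code.getD i 0) = true :=
        decide_eq_true hne
      have hf : (i :: L).filter (fun i => decide (guess.getD i 0 ≠ code.getD i 0))
          = i :: L.filter (fun i => decide (guess.getD i 0 ≠ code.getD i 0)) := by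
        rw [List.filter_cons, hd]
        simp
      by_cases hmem : some (guess.getD i 0) ∈ cc
      · have hcond : guess.getD i 0 ≠ code.getD i 0 ∧ some (guess.getD i 0) ∈ cc :=
          ⟨hne, hmem⟩
        rw [List.foldl_cons, if_pos hcond, ih, pvErase cc _ hmem, hf, List.map_cons]
        simp only [pvGreedy]
        rw [if_pos ((pvMemFilterMap cc _).mp hmem)]
        push_cast
        ring
      · have hcond : ¬ (guess.getD i 0 ≠ code.getD i 0 ∧ some (guess.getD i 0) ∈ cc) :=
          fun h => hmem h.2
        rw [List.foldl_cons, if_neg hcond, ih, hf, List.map_cons]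
        simp only [pvGreedy]
        rw [if_neg (fun hcon => hmem ((pvMemFilterMap cc _).mpr hcon))]
    · have hcond : ¬ (guess.getD i 0 ≠ code.getD i 0 ∧ some (guess.getD i 0) ∈ cc) :=
        fun h => hne h.1
      have hd : decide (guess.getD i 0 ≠ code.getD i 0) = false :=
        decide_eq_false hne
      have hf : (i :: L).filter (fun i => decide (guess.getD i 0 ≠ code.getD i 0))
          = L.filter (fun i => decide (guess.getD i 0 ≠ code.getD i 0)) := by
        rw [List.filter_cons, hd]
        simp
      rw [List.foldl_cons, if_neg hcond, ih, hf]

theorem pvFoldSet (q : Nat → Prop) [DecidablePred q] :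
    ∀ (L : List Nat) (cc : List (Option Int)) (j : Nat),
      (L.foldl (fun cc i => if q i then cc.set i none else cc) cc)[j]?
        = if j ∈ L ∧ q j ∧ j < cc.length then some none else cc[j]? := by
  intro L
  induction L with
  | nil => intro cc j; simp
  | cons i L ih =>
    intro cc j
    simp only [List.foldl_cons]
    by_cases hqi : q i
    · rw [if_pos hqi, ih, List.length_set]
      by_cases hc : j ∈ L ∧ q j ∧ j < cc.length
      · rw [if_pos hc, if_pos ⟨List.mem_cons_of_mem i hc.1, hc.2⟩]
      · rw [if_neg hc, List.getElem?_set]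
        by_cases hij : i = j
        · subst hij
          rw [if_pos rfl]
          by_cases hil : i < cc.length
          · rw [if_pos hil, if_pos ⟨List.mem_cons_self, hqi, hil⟩]
          · rw [if_neg hil, if_neg (fun ho => hil ho.2.2),
              List.getElem?_eq_none (by omega)]
        · rw [if_neg hij]
          by_cases houter : j ∈ i :: L ∧ q j ∧ j < cc.length
          · exfalso
            rcases List.mem_cons.mp houter.1 with h' | h'
            · exact hij h'.symm
            · exact hc ⟨h', houter.2⟩
          · rw [if_neg houter]
    · rw [if_neg hqi, ih]
      by_cases hc : j ∈ L ∧ q j ∧ j < cc.length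
      · rw [if_pos hc, if_pos ⟨List.mem_cons_of_mem i hc.1, hc.2⟩]
      · rw [if_neg hc]
        by_cases houter : j ∈ i :: L ∧ q j ∧ j < cc.length
        · exfalso
          rcases List.mem_cons.mp houter.1 with h' | h'
          · exact hqi (h' ▸ houter.2.1)
          · exact hc ⟨h', houter.2⟩
        · rw [if_neg houter]

theorem pvCC1 (guess code : List Int) :
    ((List.range (min guess.length code.length)).foldl
        (fun cc i => if guess.getD i 0 = code.getD i 0 then cc.set i none else cc)
        (code.map some))
      = (List.range code.length).map
          (fun j => if j < min guess.length code.length ∧ guess.getD j 0 = code.getD j 0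
            then none else some (code.getD j 0)) := by
  apply List.ext_getElem?
  intro j
  rw [pvFoldSet (fun i => guess.getD i 0 = code.getD i 0), List.length_map]
  by_cases hj : j < code.length
  · have hmapl : (code.map some)[j]? = some (some (code.getD j 0)) := by
      rw [List.getElem?_map, List.getElem?_eq_getElem hj, Option.map_some,
        List.getD_eq_getElem code 0 hj]
    have hr : ((List.range code.length).map
        (fun j => if j < min guess.length code.length ∧ guess.getD j 0 = code.getD j 0
          then (none : Option Int) else some (code.getD j 0)))[j]?
        = some (if j < min guess.length code.length ∧ guess.getD j 0 = code.getD j 0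
          then (none : Option Int) else some (code.getD j 0)) := by
      rw [List.getElem?_map, List.getElem?_range hj, Option.map_some]
    rw [hr]
    split_ifs with h1 h2 h3
    · rfl
    · exact absurd ⟨List.mem_range.mp h1.1, h1.2.1⟩ h2
    · exact absurd ⟨List.mem_range.mpr h3.1, h3.2, hj⟩ h1
    · exact hmapl
  · rw [if_neg (fun h => hj h.2.2)]
    have h1 : (code.map some)[j]? = none := by
      apply List.getElem?_eq_none
      rw [List.length_map]
      omega
    have h2 : ((List.range code.length).map
        (fun j => if j < min guess.length code.length ∧ guess.getD j 0 = code.getD j 0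
          then (none : Option Int) else some (code.getD j 0)))[j]? = none := by
      apply List.getElem?_eq_none
      rw [List.length_map, List.length_range]
      omega
    rw [h1, h2]

theorem pvFilterMapIte (l : List Nat) (C : Nat → Prop) [DecidablePred C] (f : Nat → Int) :
    l.filterMap (fun j => if C j then none else some (f j))
      = (l.filter (fun j => decide (¬ C j))).map f := by
  induction l with
  | nil => simp
  | cons a l ih =>
    by_cases h : C a <;> simp [h, ih]

theorem pvAval (guess code : List Int) :
    wrong_position guess code = (pvGreedy (pvGRem guess code) (pvCRem guess code) : Int) := by
  simp only [wrong_position]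
  rw [pvLoop2 guess code]
  rw [pvCC1 guess code]
  rw [List.filterMap_map]
  simp only [Function.id_comp]
  rw [pvFilterMapIte]
  unfold pvGRem pvCRem
  rw [zero_add]

theorem pvGC (guess code : List Int) :
    (List.range (min guess.length code.length)).foldl
        (fun (d : PySem.Dict Int Int) i =>
          if guess.getD i 0 ≠ code.getD i 0 then
            d.insert (guess.getD i 0) (d.getD (guess.getD i 0) 0 + 1)
          else d) PySem.Dict.empty
      = PySem.Dict.counter (pvGRem guess code) := by
  rw [PySem.List.foldl_ite_eq_foldl_filter]
  rw [← PySem.Dict.foldl_insert_getD_add_one_eq_counter]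
  unfold pvGRem
  rw [List.foldl_map]

theorem pvCC (guess code : List Int) :
    (List.range code.length).foldl
        (fun (d : PySem.Dict Int Int) i =>
          if i < min guess.length code.length ∧ guess.getD i 0 = code.getD i 0 then d
          else d.insert (code.getD i 0) (d.getD (code.getD i 0) 0 + 1)) PySem.Dict.empty
      = PySem.Dict.counter (pvCRem guess code) := by
  rw [PySem.List.foldl_congr_mem _ _
      (fun (d : PySem.Dict Int Int) i =>
        if ¬ (i < min guess.length code.length ∧ guess.getD i 0 = code.getD i 0) then
          d.insert (code.getD i 0) (d.getD (code.getD i 0) 0 + 1)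
        else d) _
      (by
        intro d i _
        dsimp only
        by_cases h : i < min guess.length code.length ∧ guess.getD i 0 = code.getD i 0
        · rw [if_pos h, if_neg (not_not_intro h)]
        · rw [if_neg h, if_pos h])]
  rw [PySem.List.foldl_ite_eq_foldl_filter]
  rw [← PySem.Dict.foldl_insert_getD_add_one_eq_counter]
  unfold pvCRem
  rw [List.foldl_map]

theorem pvBval (guess code : List Int) :
    wrong_position_alt guess code
      = ((PySem.Set.ofList (pvGRem guess code)).map
          (fun c => min ((pvGRem guess code).count c : Int) ((pvCRem guess code).count c : Int))).sum := by
  simp only [wrong_position_alt]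
  rw [pvGC, pvCC, PySem.Dict.keys_counter]
  rw [PySem.List.foldl_congr_mem _ _
      (fun (total : Int) c =>
        total + min ((pvGRem guess code).count c : Int) ((pvCRem guess code).count c : Int)) _
      (by
        intro t c _
        dsimp only
        rw [PySem.Dict.getD_counter, PySem.Dict.getD_counter])]
  rw [PySem.List.foldl_add]
  rw [zero_add]

theorem pvGreedyInter : ∀ (gs cs : List Int),
    pvGreedy gs cs = ((↑gs ∩ ↑cs : Multiset Int)).card := by
  intro gs
  induction gs with
  | nil => intro cs; simp [pvGreedy]
  | cons g gs ih =>
    intro cs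
    simp only [pvGreedy]
    rw [show ((↑(g :: gs) : Multiset Int)) = g ::ₘ (↑gs : Multiset Int) from
      (Multiset.cons_coe g gs).symm]
    by_cases h : g ∈ cs
    · have hm : g ∈ (↑cs : Multiset Int) := by simpa using h
      rw [if_pos h, Multiset.cons_inter_of_pos _ hm, Multiset.card_cons, ih,
        show ((↑cs : Multiset Int).erase g) = (↑(cs.erase g) : Multiset Int) from by simp]
    · have hm : g ∉ (↑cs : Multiset Int) := by simpa using h
      rw [if_neg h, Multiset.cons_inter_of_neg _ hm, ih]

theorem pvSumMin (gs cs : List Int) :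
    ((PySem.Set.ofList gs).map
        (fun c => min ((gs.count c : Int)) ((cs.count c : Int)))).sum
      = (((↑gs : Multiset Int) ∩ ↑cs).card : Int) := by
  have hnd : (PySem.Set.ofList gs).Nodup := PySem.Set.nodup_ofList gs
  have htf : (PySem.Set.ofList gs).toFinset = gs.toFinset := by
    ext a
    simp [List.mem_toFinset, PySem.Set.mem_ofList]
  rw [← List.sum_toFinset _ hnd, htf]
  have hsub : ((↑gs : Multiset Int) ∩ ↑cs).toFinset ⊆ gs.toFinset := by
    intro a ha
    simp only [Multiset.mem_toFinset] at ha
    simpa [List.mem_toFinset] using Multiset.mem_of_le Multiset.inter_le_left ha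
  have hcard : (((↑gs : Multiset Int) ∩ ↑cs).card)
      = ∑ a ∈ gs.toFinset, ((↑gs : Multiset Int) ∩ ↑cs).count a := by
    rw [← Multiset.toFinset_sum_count_eq]
    exact (Finset.sum_subset hsub (fun a _ ha =>
      Multiset.count_eq_zero.2 (fun hmem => ha (Multiset.mem_toFinset.mpr hmem))))
  rw [hcard]
  push_cast
  apply Finset.sum_congr rfl
  intro a _
  simp

-- ===== VERDICT (by name: the statement is the Claim_ definition above) =====
theorem wrong_position_spec : Claim_equal_wrong_position := by
  intro guess code _
  unfold Spec_wrong_position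
  rw [pvAval, pvBval, pvSumMin, pvGreedyInter]
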